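-- pv_equiv track=rewrite | github.com/rytee20/Lab1-3-py | Task2.py | minusoneifzero
-- ===== SOURCE A (Python) =====
-- def minusoneifzero(listofnumbers): #функция отнимает 1 от чисел, если есть 0 в последовательности, возвращает новый список
--     defcountofoperations=0 #количество операций в функции
--     for i in range(len(listofnumbers) - 1, -1, -1):
--         if listofnumbers[i]!=0: #если элемент !=0
--             if i==0 or listofnumbers[i-1]==0: #если это первый элемент в списке или если предыдущий был равен нулю
--                 listofnumbers[i] = listofnumbers[i] - 1 #элемент-1
--                 defcountofoperations = defcountofoperations + 1 #количество операций +1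
--             else:
--                 listofnumbers[i] = listofnumbers[i] - 1
--     return listofnumbers, defcountofoperations #возвращаем список и количество операций
-- ===== SOURCE B (Python) =====
-- def minusoneifzero(listofnumbers):
--     # Run-based scanner: the list is a sequence of maximal runs of nonzero values
--     # separated by zeros.  Each run costs exactly one operation (its first element is
--     # the boundary A counts); walk run by run, decrementing the run's elements in place.
--     n = len(listofnumbers)
--     ops = 0
--     i = 0
--     while i < n:
--         # skip the zeros before the next run
--         while i < n and listofnumbers[i] == 0:
--             i += 1
--         if i < n:
--             # one maximal nonzero run: one operation, decrement each of its elements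
--             ops += 1
--             while i < n and listofnumbers[i] != 0:
--                 listofnumbers[i] -= 1
--                 i += 1
--     return listofnumbers, ops
-- ===== Notes on version B (the rewrite author's own statement) =====
-- stated objective: alternative
-- what changed: B is a run-based scanner: it views the list as maximal runs of nonzero values separated by zeros, skips each zero gap with one inner loop and consumes each run with another (one operation per run, decrementing the run's elements in place), instead of A's backward per-index loop that tests every element's predecessor to decide whether to count.
import Mathlib
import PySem

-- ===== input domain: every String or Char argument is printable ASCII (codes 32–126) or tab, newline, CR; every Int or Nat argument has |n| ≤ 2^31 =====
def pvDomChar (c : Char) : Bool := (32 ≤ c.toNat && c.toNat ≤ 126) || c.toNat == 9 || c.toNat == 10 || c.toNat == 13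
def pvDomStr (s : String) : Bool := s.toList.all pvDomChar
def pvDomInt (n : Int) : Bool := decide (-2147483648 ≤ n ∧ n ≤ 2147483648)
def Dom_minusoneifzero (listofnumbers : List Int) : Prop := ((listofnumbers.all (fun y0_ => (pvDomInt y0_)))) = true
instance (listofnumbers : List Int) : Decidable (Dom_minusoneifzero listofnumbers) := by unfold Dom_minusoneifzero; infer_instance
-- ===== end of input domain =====

-- B is a run-based scanner (skip each zero gap, then consume each maximal nonzero run: one
-- counted operation per run, decrementing its elements) instead of A's backward per-index pass;
-- same cost. Both Pythons mutate the argument list in place; the equivalence proved here is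
-- about the returned value.


-- ===== PORT A =====
-- backward loop over i = len-1 .. 0; decrement nonzero, count when i==0 or predecessor is 0
def minusoneifzero (listofnumbers : List Int) : List Int × Int :=
  (PySem.List.pyRange ((listofnumbers.length : Int) - 1) (-1) (-1)).foldl
    (fun st i =>
      if PySem.List.pyGetD st.1 i 0 ≠ 0 then
        if i = 0 ∨ PySem.List.pyGetD st.1 (i - 1) 0 = 0 then
          (PySem.List.pySetD st.1 i (PySem.List.pyGetD st.1 i 0 - 1), st.2 + 1)
        else
          (PySem.List.pySetD st.1 i (PySem.List.pyGetD st.1 i 0 - 1), st.2)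
      else st)
    (listofnumbers, 0)

-- ===== PORT B =====
-- inner while loop "while i < n and listofnumbers[i] == 0: i += 1"
def pvSkip (xs : List Int) (n i : Nat) : Nat :=
  if h : i < n ∧ PySem.List.pyGetD xs (i : Int) 0 = 0 then pvSkip xs n (i + 1) else i
termination_by n - i
decreasing_by omega

-- inner while loop "while i < n and listofnumbers[i] != 0: listofnumbers[i] -= 1; i += 1"
def pvDec (xs : List Int) (n i : Nat) : List Int × Nat :=
  if h : i < n ∧ ¬ PySem.List.pyGetD xs (i : Int) 0 = 0 then
    pvDec (PySem.List.pySetD xs (i : Int) (PySem.List.pyGetD xs (i : Int) 0 - 1)) n (i + 1)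
  else (xs, i)
termination_by n - i
decreasing_by omega

-- termination facts the outer loop's recursion cites (the index strictly advances)
theorem pvSkip_ge (xs : List Int) (n i : Nat) : i ≤ pvSkip xs n i := by
  induction i using pvSkip.induct (xs := xs) (n := n) with
  | case1 i h ih => rw [pvSkip, dif_pos h]; omega
  | case2 i h => rw [pvSkip, dif_neg h]

theorem pvSkip_stop (xs : List Int) (n i : Nat) :
    pvSkip xs n i < n → ¬ PySem.List.pyGetD xs ((pvSkip xs n i : Nat) : Int) 0 = 0 := by
  induction i using pvSkip.induct (xs := xs) (n := n) with
  | case1 i hc ih => rw [pvSkip, dif_pos hc]; exact ih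
  | case2 i hc =>
    rw [pvSkip, dif_neg hc]
    intro h hz; exact hc ⟨h, hz⟩

theorem pvDec_ge (xs : List Int) (n i : Nat) : i ≤ (pvDec xs n i).2 := by
  induction xs, i using pvDec.induct (n := n) with
  | case1 xs i h ih => rw [pvDec, dif_pos h]; omega
  | case2 xs i h => rw [pvDec, dif_neg h]

theorem pvDec_snd_lt (xs : List Int) (n i : Nat) (hn : i < n)
    (hnz : ¬ PySem.List.pyGetD xs (i : Int) 0 = 0) : i < (pvDec xs n i).2 := by
  rw [pvDec, dif_pos ⟨hn, hnz⟩]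
  exact Nat.lt_of_lt_of_le (Nat.lt_succ_self i) (pvDec_ge _ _ _)

-- outer while loop: skip a zero gap, then consume one nonzero run (one operation)
def pvOuter (xs : List Int) (n i : Nat) (ops : Int) : List Int × Int :=
  if hi : i < n then
    if hj : pvSkip xs n i < n then
      let p := pvDec xs n (pvSkip xs n i)
      pvOuter p.1 n p.2 (ops + 1)
    else (xs, ops)
  else (xs, ops)
termination_by n - i
decreasing_by
  have h1 := pvSkip_ge xs n i
  have h2 := pvDec_snd_lt xs n (pvSkip xs n i) hj (pvSkip_stop xs n i hj)
  omega

def minusoneifzero_alt (listofnumbers : List Int) : List Int × Int :=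
  pvOuter listofnumbers listofnumbers.length 0 0

-- ===== PRECONDITION & SPEC =====
def Spec_minusoneifzero (listofnumbers : List Int) (out : List Int × Int) : Prop := out = minusoneifzero_alt listofnumbers
instance (listofnumbers : List Int) (out : List Int × Int) : Decidable (Spec_minusoneifzero listofnumbers out) := by unfold Spec_minusoneifzero; infer_instance

-- ===== CLAIM (what is proved, stated in full; the proofs are below) =====
def Claim_equal_minusoneifzero : Prop := ∀ (listofnumbers : List Int), Dom_minusoneifzero listofnumbers → Spec_minusoneifzero listofnumbers (minusoneifzero listofnumbers)

-- ===== LEMMAS AND PROOFS =====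

-- the decrement applied to every element
def pvF (x : Int) : Int := if x ≠ 0 then x - 1 else x

-- the list after the first i positions have been processed
def pvMP (xs : List Int) (i : Nat) : List Int := (xs.take i).map pvF ++ xs.drop i

-- boundary count over the indices i, i+1, …, len-1, reading xs
def pvCntFrom (xs : List Int) (i : Nat) : Int :=
  (((List.range' i (xs.length - i)).countP (fun m =>
    decide (xs.getD m 0 ≠ 0 ∧ (m = 0 ∨ xs.getD (m - 1) 0 = 0)))) : Int)

theorem pvMP_zero (xs : List Int) : pvMP xs 0 = xs := by simp [pvMP]

theorem pvMP_full (xs : List Int) (t : Nat) (h : xs.length ≤ t) : pvMP xs t = xs.map pvF := by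
  simp [pvMP, List.take_of_length_le h, List.drop_eq_nil_of_le h]

theorem pvGetMP (xs : List Int) (t j : Nat) (ht : t ≤ j) :
    PySem.List.pyGetD (pvMP xs t) (j : Int) 0 = xs.getD j 0 := by
  rw [PySem.List.pyGetD_natCast]
  unfold pvMP
  rcases Nat.lt_or_ge xs.length t with h | h
  · rw [List.drop_eq_nil_of_le (le_of_lt h), List.take_of_length_le (le_of_lt h)]
    rw [List.append_nil, List.getD_eq_getElem?_getD, List.getD_eq_getElem?_getD,
      List.getElem?_eq_none (by simp; omega), List.getElem?_eq_none (by omega)]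
  · rw [List.getD_eq_getElem?_getD, List.getD_eq_getElem?_getD,
      List.getElem?_append_right (by simp [List.length_take]; omega)]
    rw [List.getElem?_drop]
    congr 2
    simp [List.length_take]
    omega

theorem pvMP_succ_zero (xs : List Int) (i : Nat) (hi : i < xs.length)
    (hz : xs.getD i 0 = 0) : pvMP xs (i + 1) = pvMP xs i := by
  unfold pvMP
  rw [List.take_add_one, List.getElem?_eq_getElem hi, List.drop_eq_getElem_cons hi]
  have hx : xs[i] = 0 := by
    rw [List.getD_eq_getElem?_getD, List.getElem?_eq_getElem hi] at hz
    exact hz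
  simp [pvF, hx]

theorem pvMP_ext (xs : List Int) : ∀ (d i j : Nat), j - i ≤ d → i ≤ j → j ≤ xs.length →
    (∀ m, i ≤ m → m < j → xs.getD m 0 = 0) → pvMP xs i = pvMP xs j := by
  intro d
  induction d with
  | zero => intro i j h hij _ _; exact congrArg (pvMP xs) (by omega)
  | succ d ih =>
    intro i j h hij hj hz
    rcases Nat.eq_or_lt_of_le hij with he | hlt
    · rw [he]
    · rw [← pvMP_succ_zero xs i (by omega) (hz i le_rfl hlt)]
      exact ih (i + 1) j (by omega) (by omega) hj (fun m hm hmj => hz m (by omega) hmj)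

theorem pvMP_set (xs : List Int) (i : Nat) (hi : i < xs.length)
    (hnz : xs.getD i 0 ≠ 0) :
    PySem.List.pySetD (pvMP xs i) (i : Int) (xs.getD i 0 - 1) = pvMP xs (i + 1) := by
  rw [PySem.List.pySetD_natCast]
  unfold pvMP
  have hx : xs.getD i 0 = xs[i] := by
    rw [List.getD_eq_getElem?_getD, List.getElem?_eq_getElem hi]; rfl
  rw [hx] at hnz ⊢
  have hlen : ((xs.take i).map pvF).length = i := by simp [List.length_take]; omega
  rw [List.set_append]
  simp only [hlen, Nat.lt_irrefl, Nat.sub_self, reduceIte]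
  rw [List.drop_eq_getElem_cons hi, List.set_cons_zero]
  rw [List.take_add_one, List.getElem?_eq_getElem (by simpa using hi)]
  simp only [Option.toList_some]
  rw [List.map_append]
  simp [pvF, hnz]

-- characterization of the skip loop on a processed-prefix list
theorem pvSkipSpec (xs : List Int) (t : Nat) : ∀ (d i : Nat), xs.length - i ≤ d → t ≤ i →
    i ≤ xs.length →
    i ≤ pvSkip (pvMP xs t) xs.length i ∧
    pvSkip (pvMP xs t) xs.length i ≤ xs.length ∧
    (∀ m, i ≤ m → m < pvSkip (pvMP xs t) xs.length i → xs.getD m 0 = 0) ∧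
    (pvSkip (pvMP xs t) xs.length i < xs.length →
      xs.getD (pvSkip (pvMP xs t) xs.length i) 0 ≠ 0) := by
  intro d
  induction d with
  | zero =>
    intro i h hti hin
    have hieq : i = xs.length := by omega
    rw [pvSkip, dif_neg (by omega)]
    exact ⟨le_rfl, by omega, fun m hm hmlt => by omega, by omega⟩
  | succ d ih =>
    intro i h hti hin
    by_cases hc : i < xs.length ∧ PySem.List.pyGetD (pvMP xs t) (i : Int) 0 = 0
    · rw [pvSkip, dif_pos hc]
      have hz : xs.getD i 0 = 0 := by rw [← pvGetMP xs t i hti]; exact hc.2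
      obtain ⟨h1, h2, h3, h4⟩ := ih (i + 1) (by omega) (by omega) (by omega)
      refine ⟨by omega, h2, ?_, h4⟩
      intro m hm hmlt
      rcases Nat.eq_or_lt_of_le hm with he | hlt
      · rw [← he]; exact hz
      · exact h3 m hlt hmlt
    · rw [pvSkip, dif_neg hc]
      refine ⟨le_rfl, hin, fun m hm hmlt => by omega, ?_⟩
      intro hlt hz
      exact hc ⟨hlt, by rw [pvGetMP xs t i hti]; exact hz⟩

-- characterization of the decrement loop starting at the run's first index
theorem pvDecSpec (xs : List Int) : ∀ (d j : Nat), xs.length - j ≤ d → j ≤ xs.length →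
    ∃ k, pvDec (pvMP xs j) xs.length j = (pvMP xs k, k) ∧ j ≤ k ∧ k ≤ xs.length ∧
      (∀ m, j ≤ m → m < k → xs.getD m 0 ≠ 0) ∧
      (k < xs.length → xs.getD k 0 = 0) := by
  intro d
  induction d with
  | zero =>
    intro j h hj
    have : j = xs.length := by omega
    refine ⟨j, ?_, le_rfl, hj, fun m hm hmlt => by omega, by omega⟩
    rw [pvDec, dif_neg (by omega)]
  | succ d ih =>
    intro j h hj
    by_cases hc : j < xs.length ∧ ¬ PySem.List.pyGetD (pvMP xs j) (j : Int) 0 = 0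
    · have hnz : xs.getD j 0 ≠ 0 := by rw [← pvGetMP xs j j le_rfl]; exact hc.2
      obtain ⟨k, hk, h1, h2, h3, h4⟩ := ih (j + 1) (by omega) (by omega)
      refine ⟨k, ?_, by omega, h2, ?_, h4⟩
      · rw [pvDec, dif_pos hc]
        rw [pvGetMP xs j j le_rfl, pvMP_set xs j hc.1 hnz]
        exact hk
      · intro m hm hmlt
        rcases Nat.eq_or_lt_of_le hm with he | hlt
        · rw [← he]; exact hnz
        · exact h3 m hlt hmlt
    · refine ⟨j, ?_, le_rfl, hj, fun m hm hmlt => by omega, ?_⟩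
      · rw [pvDec, dif_neg hc]
      · intro hlt
        by_contra hz
        exact hc ⟨hlt, by rw [pvGetMP xs j j le_rfl]; exact fun h' => hz h'⟩

theorem pvCntFrom_nil (xs : List Int) (i : Nat) (h : xs.length ≤ i) : pvCntFrom xs i = 0 := by
  unfold pvCntFrom
  rw [Nat.sub_eq_zero_of_le h]
  rfl

theorem pvCntFrom_step (xs : List Int) (i : Nat) (h : i < xs.length) :
    pvCntFrom xs i =
      (if xs.getD i 0 ≠ 0 ∧ (i = 0 ∨ xs.getD (i - 1) 0 = 0) then 1 else 0) +
      pvCntFrom xs (i + 1) := by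
  unfold pvCntFrom
  have hn : xs.length - i = (xs.length - (i + 1)) + 1 := by omega
  rw [hn, List.range'_succ]
  simp only [List.countP_cons]
  rcases Decidable.em (xs.getD i 0 ≠ 0 ∧ (i = 0 ∨ xs.getD (i - 1) 0 = 0)) with hcc | hcc
  · rw [if_pos (decide_eq_true hcc), if_pos hcc]
    push_cast; omega
  · rw [if_neg (fun hb => hcc (of_decide_eq_true hb)), if_neg hcc]
    push_cast; omega

theorem pvCntFrom_const (xs : List Int) : ∀ (d i j : Nat), j - i ≤ d → i ≤ j →
    j ≤ xs.length →
    (∀ m, i ≤ m → m < j → ¬ (xs.getD m 0 ≠ 0 ∧ (m = 0 ∨ xs.getD (m - 1) 0 = 0))) →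
    pvCntFrom xs i = pvCntFrom xs j := by
  intro d
  induction d with
  | zero => intro i j h hij _ _; exact congrArg (pvCntFrom xs) (by omega)
  | succ d ih =>
    intro i j h hij hj hz
    rcases Nat.eq_or_lt_of_le hij with he | hlt
    · rw [he]
    · rw [pvCntFrom_step xs i (by omega), if_neg (hz i le_rfl hlt), zero_add]
      exact ih (i + 1) j (by omega) (by omega) hj (fun m hm hmj => hz m (by omega) hmj)

-- main invariant of the outer loop
theorem pvOuterMain (xs : List Int) : ∀ (d i : Nat) (c : Int), xs.length - i ≤ d →
    i ≤ xs.length → (i = 0 ∨ i = xs.length ∨ xs.getD i 0 = 0) →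
    pvOuter (pvMP xs i) xs.length i c = (xs.map pvF, c + pvCntFrom xs i) := by
  intro d
  induction d with
  | zero =>
    intro i c h hin _
    have hieq : i = xs.length := by omega
    rw [pvOuter, dif_neg (by omega), pvMP_full xs i (by omega),
      pvCntFrom_nil xs i (by omega), add_zero]
  | succ d ih =>
    intro i c h hin hE
    by_cases hi : i < xs.length
    case neg =>
      have hieq : i = xs.length := by omega
      rw [pvOuter, dif_neg (by omega), pvMP_full xs i (by omega),
        pvCntFrom_nil xs i (by omega), add_zero]
    case pos =>
      obtain ⟨hs1, hs2, hs3, hs4⟩ := pvSkipSpec xs i xs.length i (by omega) le_rfl hin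
      set j := pvSkip (pvMP xs i) xs.length i with hjdef
      by_cases hj : j < xs.length
      case neg =>
        have hjeq : j = xs.length := by omega
        rw [pvOuter, dif_pos hi, dif_neg (by rw [← hjdef]; omega)]
        rw [pvMP_ext xs (xs.length) i xs.length (by omega) hin le_rfl
          (fun m hm hml => hs3 m hm (by omega)), pvMP_full xs xs.length le_rfl,
          pvCntFrom_const xs xs.length i xs.length (by omega) hin le_rfl
            (fun m hm hml => by
              have := hs3 m hm (by omega)
              intro hcc; exact hcc.1 this),
          pvCntFrom_nil xs xs.length le_rfl, add_zero]
      case pos =>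
        have hnzj : xs.getD j 0 ≠ 0 := hs4 hj
        -- the skipped prefix is all zeros, so the processed list is unchanged up to j
        have hMP : pvMP xs i = pvMP xs j :=
          pvMP_ext xs (j - i) i j le_rfl hs1 hs2 (fun m hm hml => hs3 m hm hml)
        obtain ⟨k, hk, hk1, hk2, hk3, hk4⟩ := pvDecSpec xs (xs.length - j) j le_rfl hs2
        have hkj : j < k := by
          rcases Nat.eq_or_lt_of_le hk1 with he | hlt
          · exfalso; exact hnzj (by rw [he]; exact hk4 (by omega))
          · exact hlt
        rw [pvOuter, dif_pos hi, dif_pos (by rw [← hjdef]; exact hj)]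
        simp only [← hjdef]
        rw [hMP, hk]
        -- entry condition for the recursive call
        have hEk : k = 0 ∨ k = xs.length ∨ xs.getD k 0 = 0 := by
          rcases Nat.eq_or_lt_of_le hk2 with he | hlt
          · exact Or.inr (Or.inl he)
          · exact Or.inr (Or.inr (hk4 hlt))
        rw [ih k (c + 1) (by omega) hk2 hEk]
        -- counting: cntFrom i = cntFrom j = 1 + cntFrom k
        have hbj : xs.getD j 0 ≠ 0 ∧ (j = 0 ∨ xs.getD (j - 1) 0 = 0) := by
          refine ⟨hnzj, ?_⟩
          rcases Nat.eq_or_lt_of_le hs1 with he | hlt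
          · rcases hE with h0 | hn | hz
            · exact Or.inl (by omega)
            · omega
            · exact absurd (by rw [he] at hz; exact hz) hnzj
          · exact Or.inr (hs3 (j - 1) (by omega) (by omega))
        have hcij : pvCntFrom xs i = pvCntFrom xs j :=
          pvCntFrom_const xs (j - i) i j le_rfl hs1 hs2
            (fun m hm hml => fun hcc => hcc.1 (hs3 m hm hml))
        have hcjk : pvCntFrom xs j = 1 + pvCntFrom xs k := by
          rw [pvCntFrom_step xs j hj, if_pos hbj]
          congr 1
          exact pvCntFrom_const xs (k - (j + 1)) (j + 1) k le_rfl (by omega) hk2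
            (fun m hm hml => fun hcc => by
              rcases hcc.2 with h0 | hz
              · omega
              · exact hk3 (m - 1) (by omega) (by omega) hz)
        rw [hcij, hcjk]
        ring_nf

-- ===== A side (reused bridge from the backward fold to a structural recursion) =====

-- A's loop in structural form: process indices k-1, k-2, …, 0
def pvAGo : List Int → Int → Nat → List Int × Int
  | ys, c, 0 => (ys, c)
  | ys, c, Nat.succ k =>
    pvAGo
      (if PySem.List.pyGetD ys (k : Int) 0 ≠ 0 then
        PySem.List.pySetD ys (k : Int) (PySem.List.pyGetD ys (k : Int) 0 - 1) else ys)
      (if PySem.List.pyGetD ys (k : Int) 0 ≠ 0 ∧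
          ((k : Int) = 0 ∨ PySem.List.pyGetD ys ((k : Int) - 1) 0 = 0) then c + 1 else c)
      k

-- boundary count over the first k indices, reading xs (Int-indexed, as A's loop states it)
def pvCnt (xs : List Int) (k : Nat) : Int :=
  ((((List.range k).map (fun (i : Nat) => (i : Int))).countP (fun i =>
    decide (PySem.List.pyGetD xs i 0 ≠ 0 ∧
      (i = 0 ∨ PySem.List.pyGetD xs (i - 1) 0 = 0)))) : Int)

theorem pvBridgeA (k : Nat) (ys : List Int) (c : Int) :
    (PySem.List.pyRange ((k : Int) - 1) (-1) (-1)).foldl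
      (fun st i =>
        if PySem.List.pyGetD st.1 i 0 ≠ 0 then
          if i = 0 ∨ PySem.List.pyGetD st.1 (i - 1) 0 = 0 then
            (PySem.List.pySetD st.1 i (PySem.List.pyGetD st.1 i 0 - 1), st.2 + 1)
          else
            (PySem.List.pySetD st.1 i (PySem.List.pyGetD st.1 i 0 - 1), st.2)
        else st)
      (ys, c) = pvAGo ys c k := by
  induction k generalizing ys c with
  | zero =>
    rw [PySem.List.pyRange_neg_one_eq_nil (by norm_num)]
    rfl
  | succ k ih =>
    have hk : ((k + 1 : Nat) : Int) - 1 = (k : Int) := by omega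
    rw [hk, PySem.List.pyRange_neg_one_cons (by omega), List.foldl_cons]
    simp only [pvAGo]
    rw [← ih]
    congr 1
    by_cases hv : PySem.List.pyGetD ys (k : Int) 0 ≠ 0 <;>
      by_cases hc : (k : Int) = 0 ∨ PySem.List.pyGetD ys ((k : Int) - 1) 0 = 0 <;>
        simp_all

theorem pvGetAux (xs : List Int) (k j : Nat) (hj : j ≤ k) (hk : k < xs.length) :
    PySem.List.pyGetD (xs.take (k + 1) ++ (xs.drop (k + 1)).map pvF) (j : Int) 0
      = PySem.List.pyGetD xs (j : Int) 0 := by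
  rw [PySem.List.pyGetD_natCast, PySem.List.pyGetD_natCast]
  rw [List.getD_eq_getElem?_getD, List.getD_eq_getElem?_getD,
    List.getElem?_append_left (by simp [List.length_take]; omega),
    List.getElem?_take]
  simp [Nat.lt_succ_of_le hj]

theorem pvMain (xs : List Int) : ∀ (k : Nat), k ≤ xs.length → ∀ (c : Int),
    pvAGo (xs.take k ++ (xs.drop k).map pvF) c k = (xs.map pvF, c + pvCnt xs k) := by
  intro k
  induction k with
  | zero => intro _ c; simp [pvAGo, pvCnt]
  | succ k ih =>
    intro hk c
    have hklt : k < xs.length := by omega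
    simp only [pvAGo]
    have hget : PySem.List.pyGetD (xs.take (k + 1) ++ (xs.drop (k + 1)).map pvF) (k : Int) 0
        = PySem.List.pyGetD xs (k : Int) 0 := pvGetAux xs k k le_rfl hklt
    have hx : PySem.List.pyGetD xs (k : Int) 0 = xs[k] := by
      rw [PySem.List.pyGetD_natCast, List.getD_eq_getElem?_getD, List.getElem?_eq_getElem hklt]
      rfl
    have hlist : (if PySem.List.pyGetD (xs.take (k + 1) ++ (xs.drop (k + 1)).map pvF) (k : Int) 0 ≠ 0 then
          PySem.List.pySetD (xs.take (k + 1) ++ (xs.drop (k + 1)).map pvF) (k : Int)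
            (PySem.List.pyGetD (xs.take (k + 1) ++ (xs.drop (k + 1)).map pvF) (k : Int) 0 - 1)
        else xs.take (k + 1) ++ (xs.drop (k + 1)).map pvF)
        = xs.take k ++ (xs.drop k).map pvF := by
      rw [hget, hx, PySem.List.pySetD_natCast,
        List.take_add_one, List.getElem?_eq_getElem hklt, List.drop_eq_getElem_cons hklt]
      have hlen : (xs.take k).length = k := by simp; omega
      by_cases h0 : xs[k] ≠ 0
      · simp only [List.map_cons]
        rw [List.append_assoc, List.set_append]
        simp [hlen, pvF, h0]
      · simp only [h0, if_false, List.map_cons]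
        simp only [ne_eq, not_not] at h0
        simp [pvF, h0]
    have hcond : (PySem.List.pyGetD (xs.take (k + 1) ++ (xs.drop (k + 1)).map pvF) (k : Int) 0 ≠ 0 ∧
          ((k : Int) = 0 ∨ PySem.List.pyGetD (xs.take (k + 1) ++ (xs.drop (k + 1)).map pvF) ((k : Int) - 1) 0 = 0))
        ↔ (PySem.List.pyGetD xs (k : Int) 0 ≠ 0 ∧
          ((k : Int) = 0 ∨ PySem.List.pyGetD xs ((k : Int) - 1) 0 = 0)) := by
      rw [hget]
      rcases Nat.eq_zero_or_pos k with h0 | h0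
      · subst h0; simp
      · have hc1 : ((k : Int) - 1) = ((k - 1 : Nat) : Int) := by omega
        rw [hc1, pvGetAux xs k (k - 1) (by omega) hklt]
    have hcnt : pvCnt xs (k + 1) = pvCnt xs k +
        (if PySem.List.pyGetD xs (k : Int) 0 ≠ 0 ∧
            ((k : Int) = 0 ∨ PySem.List.pyGetD xs ((k : Int) - 1) 0 = 0) then 1 else 0) := by
      unfold pvCnt
      rw [List.range_succ, List.map_append, List.countP_append]
      by_cases h : PySem.List.pyGetD xs (k : Int) 0 ≠ 0 ∧
          ((k : Int) = 0 ∨ PySem.List.pyGetD xs ((k : Int) - 1) 0 = 0)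
      · simp
      · simp
    rw [hlist]
    by_cases hcc : PySem.List.pyGetD xs (k : Int) 0 ≠ 0 ∧
        ((k : Int) = 0 ∨ PySem.List.pyGetD xs ((k : Int) - 1) 0 = 0)
    · rw [if_pos (hcond.mpr hcc), ih (by omega), hcnt, if_pos hcc]
      simp; ring
    · rw [if_neg (fun h => hcc (hcond.mp h)), ih (by omega), hcnt, if_neg hcc]
      simp

-- the Int-indexed boundary count of A equals B's Nat-indexed one
theorem pvCnt_eq_cntFrom (xs : List Int) : pvCnt xs xs.length = pvCntFrom xs 0 := by
  unfold pvCnt pvCntFrom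
  rw [List.countP_map, Nat.sub_zero, ← List.range_eq_range']
  congr 1
  apply List.countP_congr
  intro m _
  simp only [Function.comp]
  simp only [decide_eq_true_eq]
  rcases Nat.eq_zero_or_pos m with h0 | h0
  · subst h0
    simp only [PySem.List.pyGetD_natCast, Nat.cast_eq_zero]
    simp
  · have hc1 : ((m : Nat) : Int) - 1 = ((m - 1 : Nat) : Int) := by omega
    rw [hc1]
    simp only [PySem.List.pyGetD_natCast, Nat.cast_eq_zero]

-- ===== VERDICT (by name: the statement is the Claim_ definition above) =====
theorem minusoneifzero_spec : Claim_equal_minusoneifzero := by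
  intro xs _
  unfold Spec_minusoneifzero minusoneifzero minusoneifzero_alt
  rw [pvBridgeA xs.length xs 0]
  have hA := pvMain xs xs.length le_rfl 0
  rw [List.take_length, List.drop_length] at hA
  simp only [List.map_nil, List.append_nil, zero_add] at hA
  rw [hA]
  have hB := pvOuterMain xs xs.length 0 0 (by omega) (Nat.zero_le _) (Or.inl rfl)
  rw [pvMP_zero] at hB
  rw [hB, pvCnt_eq_cntFrom, zero_add]
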